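-- pv_equiv track=rewrite | github.com/tatHi/neural_uws | src/module.py | segmentIdLine
-- ===== SOURCE A (Python) =====
-- def segmentIdLine(idLine, segLine):
--     segIdLine = []
--     tmp = []
--     for i,s in zip(idLine, segLine):
--         tmp.append(i)
--         if s == 1:
--             segIdLine.append(tuple(tmp))
--             tmp = []
--     tmp.append(idLine[-1])
--     segIdLine.append(tuple(tmp))
--
--     return segIdLine
-- ===== SOURCE B (Python) =====
-- def segmentIdLine(idLine, segLine):
--     # Return-value equivalent rewrite: instead of A's accumulator-flush loop,
--     # repeatedly find the next boundary flag and split the zipped pairs there.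
--     last = idLine[-1]
--     pairs = list(zip(idLine, segLine))
--     out = []
--     while True:
--         k = _firstCut(pairs)
--         if k is None:
--             out.append(tuple(i for i, _ in pairs) + (last,))
--             return out
--         out.append(tuple(i for i, _ in pairs[:k + 1]))
--         pairs = pairs[k + 1:]
--
--
-- def _firstCut(ps):
--     for k in range(len(ps)):
--         if ps[k][1] == 1:
--             return k
--     return None
-- ===== Notes on version B (the rewrite author's own statement) =====
-- stated objective: alternative
-- what changed: A single-pass accumulator that flushes a temporary segment at each flag is replaced by a find-next-boundary-and-split loop over the zipped pairs, slicing whole segments out at once.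
import Mathlib
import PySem

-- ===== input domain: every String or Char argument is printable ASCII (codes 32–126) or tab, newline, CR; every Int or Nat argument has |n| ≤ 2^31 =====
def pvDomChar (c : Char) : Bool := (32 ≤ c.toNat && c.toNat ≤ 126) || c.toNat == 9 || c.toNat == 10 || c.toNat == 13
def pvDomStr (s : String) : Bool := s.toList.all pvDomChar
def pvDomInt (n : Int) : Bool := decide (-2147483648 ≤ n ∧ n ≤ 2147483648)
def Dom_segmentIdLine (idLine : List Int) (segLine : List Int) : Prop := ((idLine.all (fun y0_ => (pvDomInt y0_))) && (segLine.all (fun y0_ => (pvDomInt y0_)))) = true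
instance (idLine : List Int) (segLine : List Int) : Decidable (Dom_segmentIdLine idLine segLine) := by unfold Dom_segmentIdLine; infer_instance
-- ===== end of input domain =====

-- B replaces A's accumulator-flush loop by a find-next-boundary-and-split loop (alternative decomposition, same cost).

-- ===== PORT A =====
-- the loop body: tmp.append(i); if s == 1: segIdLine.append(tuple(tmp)); tmp = []
def segStepA (st : List (List Int) × List Int) (p : Int × Int) : List (List Int) × List Int :=
  let tmp := st.2 ++ [p.1]
  if p.2 = 1 then (st.1 ++ [tmp], []) else (st.1, tmp)

def segmentIdLine (idLine : List Int) (segLine : List Int) : List (List Int) :=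
  let st := (idLine.zip segLine).foldl segStepA ([], [])
  -- idLine[-1]: pyGet? is none exactly when Python raises IndexError (excluded by Pre_)
  match PySem.List.pyGet? idLine (-1) with
  | none => []
  | some last => st.1 ++ [st.2 ++ [last]]

-- ===== PORT B =====
-- _firstCut: first index k with ps[k][1] == 1 (forward scan, as in Source B)
def firstCutB : List (Int × Int) → Option Nat
  | [] => none
  | p :: rest => if p.2 = 1 then some 0 else (firstCutB rest).map (· + 1)

theorem firstCutB_lt {ps : List (Int × Int)} {k : Nat} (h : firstCutB ps = some k) : k < ps.length := by
  induction ps generalizing k with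
  | nil => simp [firstCutB] at h
  | cons p rest ih =>
    by_cases hp : p.2 = 1
    · simp [firstCutB, hp] at h
      simp [← h]
    · simp only [firstCutB, hp, ite_false, Option.map_eq_some_iff] at h
      obtain ⟨j, hj, rfl⟩ := h
      have := ih hj
      simp only [List.length_cons]
      omega

-- the while loop of Source B: split off the segment up to the first cut, or finish
def goB (last : Int) (ps : List (Int × Int)) : List (List Int) :=
  match h : firstCutB ps with
  | none => [ps.map Prod.fst ++ [last]]
  | some k => (ps.take (k + 1)).map Prod.fst :: goB last (ps.drop (k + 1))
termination_by ps.length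
decreasing_by
  have := firstCutB_lt h; simp; omega

def segmentIdLine_alt (idLine : List Int) (segLine : List Int) : List (List Int) :=
  -- last = idLine[-1]; raises on empty idLine exactly as A does (excluded by Pre_)
  match PySem.List.pyGet? idLine (-1) with
  | none => []
  | some last => goB last (idLine.zip segLine)

-- ===== PRECONDITION & SPEC =====
-- Pre_ excludes only empty idLine, on which both Pythons raise IndexError at idLine[-1].
def Pre_segmentIdLine (idLine : List Int) (segLine : List Int) : Prop := idLine ≠ []
instance (idLine : List Int) (segLine : List Int) : Decidable (Pre_segmentIdLine idLine segLine) := by unfold Pre_segmentIdLine; infer_instance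
def pvWitness_segmentIdLine : List Int × List Int := ([4, 7, 2], [1, 0, 1])

def Spec_segmentIdLine (idLine : List Int) (segLine : List Int) (out : List (List Int)) : Prop := out = segmentIdLine_alt idLine segLine
instance (idLine : List Int) (segLine : List Int) (out : List (List Int)) : Decidable (Spec_segmentIdLine idLine segLine out) := by unfold Spec_segmentIdLine; infer_instance

-- ===== CLAIM (what is proved, stated in full; the proofs are below) =====
def Claim_equal_segmentIdLine : Prop := ∀ (idLine : List Int) (segLine : List Int), Dom_segmentIdLine idLine segLine → Pre_segmentIdLine idLine segLine → Spec_segmentIdLine idLine segLine (segmentIdLine idLine segLine)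

-- ===== LEMMAS AND PROOFS =====

-- unfolding equations for goB, one per branch of the split
theorem goB_none {ps : List (Int × Int)} (last : Int) (h : firstCutB ps = none) :
    goB last ps = [ps.map Prod.fst ++ [last]] := by
  rw [goB]; split
  · rfl
  · next k h' => rw [h] at h'; exact absurd h' (by simp)

theorem goB_some {ps : List (Int × Int)} {k : Nat} (last : Int) (h : firstCutB ps = some k) :
    goB last ps = (ps.take (k + 1)).map Prod.fst :: goB last (ps.drop (k + 1)) := by
  rw [goB]; split
  · next h' => rw [h] at h'; exact absurd h' (by simp)
  · next k' h' => rw [h] at h'; cases h'; rfl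

-- goB unfolds on a cons like A's loop body does
theorem goB_cons (last : Int) (p : Int × Int) (rest : List (Int × Int)) :
    goB last (p :: rest) =
      if p.2 = 1 then [p.1] :: goB last rest
      else (goB last rest).modifyHead (p.1 :: ·) := by
  by_cases hp : p.2 = 1
  · have h : firstCutB (p :: rest) = some 0 := by simp [firstCutB, hp]
    rw [goB_some last h]
    simp [hp]
  · cases hr : firstCutB rest with
    | none =>
      have h : firstCutB (p :: rest) = none := by simp [firstCutB, hp, hr]
      rw [goB_none last h, goB_none last hr]
      simp [hp]
    | some k =>
      have h : firstCutB (p :: rest) = some (k + 1) := by simp [firstCutB, hp, hr]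
      rw [goB_some last h, goB_some last hr]
      simp [hp]

-- main invariant: A's fold state (acc, tmp) closed off with `last` equals
-- acc ++ goB with tmp prefixed onto the first segment goB produces
theorem fold_eq_goB (ps : List (Int × Int)) (acc : List (List Int)) (tmp : List Int) (last : Int) :
    (ps.foldl segStepA (acc, tmp)).1 ++ [(ps.foldl segStepA (acc, tmp)).2 ++ [last]]
      = acc ++ (goB last ps).modifyHead (tmp ++ ·) := by
  induction ps generalizing acc tmp with
  | nil =>
    rw [goB_none last (by simp [firstCutB])]
    simp
  | cons p rest ih =>
    by_cases hp : p.2 = 1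
    · have : segStepA (acc, tmp) p = (acc ++ [tmp ++ [p.1]], []) := by
        simp [segStepA, hp]
      rw [List.foldl_cons, this, ih, goB_cons]
      cases hg : goB last rest with
      | nil => simp [hp]
      | cons h t => simp [hp]
    · have : segStepA (acc, tmp) p = (acc, tmp ++ [p.1]) := by
        simp [segStepA, hp]
      rw [List.foldl_cons, this, ih, goB_cons]
      cases hg : goB last rest with
      | nil => simp [hp]
      | cons h t => simp [hp]

-- ===== VERDICT (by name: the statement is the Claim_ definition above) =====
theorem segmentIdLine_spec : Claim_equal_segmentIdLine := by
  intro idLine segLine _ hpre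
  unfold Spec_segmentIdLine segmentIdLine segmentIdLine_alt
  cases h : PySem.List.pyGet? idLine (-1) with
  | none =>
    -- Pre_ (idLine ≠ []) rules out the IndexError branch
    exact absurd (List.getLast?_eq_none_iff.mp (PySem.List.pyGet?_neg_one idLine ▸ h)) hpre
  | some last =>
    simp only []
    rw [fold_eq_goB]
    cases hg : goB last (idLine.zip segLine) <;> simp
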